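-- pv_equiv track=rewrite | github.com/soyukke/lean-unsolved | scripts/collatz_v2_block_deep.py | get_v2_sequence
-- ===== SOURCE A (Python) =====
-- def v2(n):
--     if n == 0:
--         return float('inf')
--     count = 0
--     while n % 2 == 0:
--         n //= 2
--         count += 1
--     return count
--
-- def get_v2_sequence(n, length=500):
--     seq = []
--     current = n
--     for _ in range(length):
--         if current == 1:
--             break
--         val = 3 * current + 1
--         v = v2(val)
--         seq.append(v)
--         current = val >> v
--     return seq
-- ===== SOURCE B (Python) =====
-- def get_v2_sequence(n, length=500):
--     # closed-form 2-adic valuation via the lowest-set-bit trick; no helper loop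
--     seq = []
--     current = n
--     steps = 0
--     while steps < length and current != 1:
--         val = 3 * current + 1
--         v = (val & -val).bit_length() - 1
--         seq.append(v)
--         current = val >> v
--         steps += 1
--     return seq
-- ===== Notes on version B (the rewrite author's own statement) =====
-- stated objective: idiomatic
-- what changed: The per-step 2-adic valuation is computed in closed form with the lowest-set-bit trick (val & -val).bit_length() - 1 instead of the v2 helper's divide-by-2 counting loop; the sequence is built in a single while loop with no helper function.
import Mathlib
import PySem

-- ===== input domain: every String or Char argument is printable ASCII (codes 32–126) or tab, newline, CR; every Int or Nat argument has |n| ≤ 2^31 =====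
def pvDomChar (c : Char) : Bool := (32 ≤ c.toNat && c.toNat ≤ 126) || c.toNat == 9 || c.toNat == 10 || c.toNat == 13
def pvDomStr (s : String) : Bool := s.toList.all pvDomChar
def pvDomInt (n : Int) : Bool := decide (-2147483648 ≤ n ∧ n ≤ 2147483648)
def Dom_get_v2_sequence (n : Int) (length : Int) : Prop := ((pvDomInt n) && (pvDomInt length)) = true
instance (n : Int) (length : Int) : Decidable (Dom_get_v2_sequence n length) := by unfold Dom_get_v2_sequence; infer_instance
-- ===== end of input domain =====

-- B replaces A's v2 counting-loop helper by the closed-form lowest-set-bit trick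
-- (val & -val).bit_length() - 1, inlined in a single while loop (same speed class).

-- ===== PORT A =====

-- termination helper for v2: an even nonzero int strictly shrinks under // 2
theorem pv_v2_dec (m : Int) (h0 : ¬ m = 0) (h2 : PySem.Int.mod m 2 = 0) :
    (PySem.Int.floordiv m 2).natAbs < m.natAbs := by
  rcases (PySem.Int.mod_eq_zero_iff_dvd m 2).mp h2 with ⟨k, hk⟩
  rw [PySem.Int.floordiv_eq_ediv_of_pos (by omega)]
  omega

-- v2(n): Python returns float('inf') for n == 0; that branch is unreachable at the
-- only call site (val = 3*current+1 is never 0 for integer current), ported as 0.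
def v2 (m : Int) : Int :=
  if h0 : m = 0 then 0
  else if h2 : PySem.Int.mod m 2 = 0 then v2 (PySem.Int.floordiv m 2) + 1
  else 0
termination_by m.natAbs
decreasing_by exact pv_v2_dec m h0 h2

-- for _ in range(length): if current == 1: break; …  (val >> v ported with v.toNat: v = v2 val ≥ 0)
def loopA : Nat → Int → List Int → List Int
  | 0, _, seq => seq
  | fuel + 1, current, seq =>
    if current = 1 then seq
    else loopA fuel ((3 * current + 1) >>> (v2 (3 * current + 1)).toNat)
      (seq ++ [v2 (3 * current + 1)])

def get_v2_sequence (n : Int) (length : Int) : List Int :=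
  loopA length.toNat n []

-- ===== PORT B =====

-- while steps < length and current != 1; fuel = length - steps iterations remain
def loopB : Nat → Int → List Int → List Int
  | 0, _, seq => seq
  | fuel + 1, current, seq =>
    if current = 1 then seq
    else loopB fuel ((3 * current + 1) >>>
        (((PySem.Int.bitLength (PySem.Int.band (3 * current + 1) (-(3 * current + 1))) : Int) - 1)).toNat)
      (seq ++ [(PySem.Int.bitLength (PySem.Int.band (3 * current + 1) (-(3 * current + 1))) : Int) - 1])

def get_v2_sequence_alt (n : Int) (length : Int) : List Int :=
  loopB length.toNat n []

-- ===== PRECONDITION & SPEC =====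
def Spec_get_v2_sequence (n : Int) (length : Int) (out : List Int) : Prop := out = get_v2_sequence_alt n length
instance (n : Int) (length : Int) (out : List Int) : Decidable (Spec_get_v2_sequence n length out) := by unfold Spec_get_v2_sequence; infer_instance

-- ===== CLAIM (what is proved, stated in full; the proofs are below) =====
def Claim_equal_get_v2_sequence : Prop := ∀ (n : Int) (length : Int), Dom_get_v2_sequence n length → Spec_get_v2_sequence n length (get_v2_sequence n length)

-- ===== LEMMAS AND PROOFS =====

-- clearing the lowest set bit: for odd m, (2^v*m) &&& (2^v*m - 1) = 2^v*(m-1) (Nat)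
theorem pv_land_pred (v m : Nat) (hm : m % 2 = 1) :
    (2 ^ v * m) &&& (2 ^ v * m - 1) = 2 ^ v * (m - 1) := by
  have hpos : 0 < 2 ^ v := Nat.two_pow_pos v
  have hsplit : 2 ^ v * m = 2 ^ v * (m - 1) + 2 ^ v := by
    obtain ⟨t, rfl⟩ : ∃ t, m = t + 1 := ⟨m - 1, by omega⟩
    simp [Nat.mul_add]
  have hsub : 2 ^ v * m - 1 = 2 ^ v * (m - 1) + (2 ^ v - 1) := by omega
  apply Nat.eq_of_testBit_eq
  intro i
  have h1 : (2 ^ v * m).testBit i = if i < v then (0 : Nat).testBit i else m.testBit (i - v) := by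
    have := Nat.testBit_two_pow_mul_add m (b := 0) (i := v) hpos i
    simpa using this
  have h2 : (2 ^ v * m - 1).testBit i =
      if i < v then (2 ^ v - 1).testBit i else (m - 1).testBit (i - v) := by
    rw [hsub]
    exact Nat.testBit_two_pow_mul_add (m - 1) (by omega) i
  have h3 : (2 ^ v * (m - 1)).testBit i =
      if i < v then (0 : Nat).testBit i else (m - 1).testBit (i - v) := by
    have := Nat.testBit_two_pow_mul_add (m - 1) (b := 0) (i := v) hpos i
    simpa using this
  rw [Nat.testBit_land, h1, h2, h3]
  by_cases hiv : i < v
  · simp [hiv]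
  · simp only [hiv, if_false]
    rcases Nat.eq_zero_or_pos (i - v) with hj | hj
    · rw [hj]
      simp [Nat.testBit_zero]
      omega
    · obtain ⟨j, hji⟩ : ∃ j, i - v = j + 1 := ⟨i - v - 1, by omega⟩
      rw [hji, Nat.testBit_add_one, Nat.testBit_add_one]
      have : m / 2 = (m - 1) / 2 := by omega
      rw [this, Bool.and_self]

-- PySem.Int.band n (-n) in terms of natAbs, for n ≠ 0
theorem pv_band_neg (n : Int) (hn : n ≠ 0) :
    PySem.Int.band n (-n) = ((n.natAbs - (n.natAbs &&& (n.natAbs - 1)) : Nat) : Int) := by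
  rcases lt_or_gt_of_ne hn with h | h
  · have h1 : ¬ (0 : Int) ≤ n := by omega
    have h2 : (0 : Int) ≤ -n := by omega
    simp only [PySem.Int.band, h1, h2, if_false, if_true]
    have e1 : (-n).toNat = n.natAbs := by omega
    have e2 : (-n - 1).toNat = n.natAbs - 1 := by omega
    rw [e1, e2]
  · have h1 : (0 : Int) ≤ n := by omega
    have h2 : ¬ (0 : Int) ≤ -n := by omega
    simp only [PySem.Int.band, h1, h2, if_true, if_false]
    have e1 : n.toNat = n.natAbs := by omega
    have e2 : (- -n - 1).toNat = n.natAbs - 1 := by omega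
    rw [e1, e2]

-- lowest set bit: n = 2^v * m with m odd (Python % 2 == 1) gives n & -n = 2^v
theorem pv_band_eq_pow (v : Nat) (m : Int) (hm : PySem.Int.mod m 2 = 1)
    (n : Int) (hn : n = 2 ^ v * m) :
    PySem.Int.band n (-n) = (2 : Int) ^ v := by
  have hm1 : m % 2 = 1 := by rwa [PySem.Int.mod_eq_emod_of_pos (by omega : (0:Int) < 2)] at hm
  have hm0 : m ≠ 0 := by omega
  have hn0 : n ≠ 0 := by
    intro h0; rw [h0] at hn
    have := pow_pos (by omega : (0:Int) < 2) v
    rcases mul_eq_zero.mp hn.symm with h | h <;> omega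
  rw [pv_band_neg n hn0]
  have hna : n.natAbs = 2 ^ v * m.natAbs := by
    rw [hn, Int.natAbs_mul, Int.natAbs_pow]
    norm_num
  have hmo : m.natAbs % 2 = 1 := by omega
  rw [hna, pv_land_pred v m.natAbs hmo]
  have hge : 1 ≤ m.natAbs := by omega
  have e : 2 ^ v * (m.natAbs - 1) = 2 ^ v * m.natAbs - 2 ^ v := by
    rw [Nat.mul_sub, Nat.mul_one]
  have le1 : 2 ^ v ≤ 2 ^ v * m.natAbs := by
    calc 2 ^ v = 2 ^ v * 1 := by ring
      _ ≤ 2 ^ v * m.natAbs := Nat.mul_le_mul_left _ (by omega)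
  have : 2 ^ v * m.natAbs - 2 ^ v * (m.natAbs - 1) = 2 ^ v := by rw [e, Nat.sub_sub_self le1]
  rw [this]
  push_cast
  ring

-- bit_length of a power of two
theorem pv_bitLength_pow (v : Nat) : PySem.Int.bitLength ((2 : Int) ^ v) = v + 1 := by
  induction v with
  | zero => decide
  | succ k ih =>
    have hpos : (0 : Int) < 2 ^ (k + 1) := pow_pos (by omega) _
    rw [PySem.Int.bitLength_of_pos hpos]
    have : PySem.Int.floordiv ((2 : Int) ^ (k + 1)) 2 = 2 ^ k := by
      rw [PySem.Int.floordiv_eq_ediv_of_pos (by omega), pow_succ]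
      omega
    rw [this, ih]

-- A's v2 on a decomposed input
theorem pv_v2_eq (v : Nat) (m : Int) (hm : PySem.Int.mod m 2 = 1) :
    v2 (2 ^ v * m) = (v : Int) := by
  have hm1 : m % 2 = 1 := by rwa [PySem.Int.mod_eq_emod_of_pos (by omega : (0:Int) < 2)] at hm
  induction v with
  | zero =>
    simp only [pow_zero, one_mul]
    have h0 : m ≠ 0 := by omega
    have h2 : ¬ PySem.Int.mod m 2 = 0 := by rw [hm]; omega
    rw [v2, dif_neg h0, dif_neg h2]
    simp
  | succ k ih =>
    have hne : (2 : Int) ^ (k + 1) * m ≠ 0 := by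
      have := pow_pos (by omega : (0:Int) < 2) (k + 1)
      intro h; rcases mul_eq_zero.mp h with h | h <;> omega
    have hdvd : (2 : Int) ∣ 2 ^ (k + 1) * m := ⟨2 ^ k * m, by ring⟩
    have h2 : PySem.Int.mod ((2 : Int) ^ (k + 1) * m) 2 = 0 :=
      (PySem.Int.mod_eq_zero_iff_dvd _ _).mpr hdvd
    have hdiv : PySem.Int.floordiv ((2 : Int) ^ (k + 1) * m) 2 = 2 ^ k * m := by
      rw [PySem.Int.floordiv_eq_ediv_of_pos (by omega)]
      have : (2 : Int) ^ (k + 1) * m = 2 ^ k * m * 2 := by ring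
      rw [this, Int.mul_ediv_cancel _ (by omega)]
    rw [v2, dif_neg hne, dif_pos h2, hdiv, ih]
    push_cast; ring

-- every nonzero integer is 2^v * (odd)
theorem pv_decomp (n : Int) (hn : n ≠ 0) :
    ∃ (v : Nat) (m : Int), PySem.Int.mod m 2 = 1 ∧ n = 2 ^ v * m := by
  have H : ∀ (a : Nat), ∀ (n : Int), n.natAbs = a → n ≠ 0 →
      ∃ (v : Nat) (m : Int), PySem.Int.mod m 2 = 1 ∧ n = 2 ^ v * m := by
    intro a
    induction a using Nat.strong_induction_on with
    | _ a ih =>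
      intro n hna hn
      by_cases hodd : n % 2 = 1
      · exact ⟨0, n, by rw [PySem.Int.mod_eq_emod_of_pos (by omega : (0:Int) < 2)]; exact hodd, by ring⟩
      · have hev : (2 : Int) ∣ n := by omega
        rcases hev with ⟨k, hk⟩
        have hk0 : k ≠ 0 := by omega
        have hlt : k.natAbs < a := by omega
        rcases ih k.natAbs hlt k rfl hk0 with ⟨v, m, hm, he⟩
        exact ⟨v + 1, m, hm, by rw [hk, he]; ring⟩
  exact H n.natAbs n rfl hn

-- the two per-step valuations agree for any nonzero val
theorem pv_v_eq (val : Int) (hv : val ≠ 0) :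
    ((PySem.Int.bitLength (PySem.Int.band val (-val)) : Nat) : Int) - 1 = v2 val := by
  rcases pv_decomp val hv with ⟨v, m, hm, he⟩
  rw [pv_band_eq_pow v m hm val he, pv_bitLength_pow, he, pv_v2_eq v m hm]
  push_cast; ring

theorem pv_loop_eq (fuel : Nat) : ∀ (current : Int) (seq : List Int),
    loopA fuel current seq = loopB fuel current seq := by
  induction fuel with
  | zero => intro c s; rfl
  | succ k ih =>
    intro c s
    rw [loopA, loopB]
    by_cases h1 : c = 1
    · simp [h1]
    · simp only [h1, if_false]
      have hv : (3 * c + 1 : Int) ≠ 0 := by omega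
      rw [pv_v_eq (3 * c + 1) hv, ih]

-- ===== VERDICT (by name: the statement is the Claim_ definition above) =====
theorem get_v2_sequence_spec : Claim_equal_get_v2_sequence := by
  intro n length _
  show get_v2_sequence n length = get_v2_sequence_alt n length
  unfold get_v2_sequence get_v2_sequence_alt
  exact pv_loop_eq length.toNat n []
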